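-- pv_equiv track=rewrite | github.com/pypi-data/pypi-mirror-66 | packages/common-col-patterns/common_col_patterns-0.0.2.tar.gz/common_col_patterns-0.0.2/common_col_patterns/col_tools.py | neighbour_set
-- ===== SOURCE A (Python) =====
-- from typing import Sequence, Iterable, Sized, Hashable, Tuple
--
-- def neighbour_set(seq: Sequence[Hashable], item: Hashable) -> frozenset:
--     """
--
--     :param seq: any sequence of hashable items
--     :param item: an item we expect to find in seq
--     :return: all the neighbours of item in seq
--     """
--     indices = [i for i, x in enumerate(seq) if x == item]
--     neighbour_indices = {
--         x - 1 for x in indices if x > 0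
--     }.union({
--         x + 1 for x in indices if x < len(seq) - 1
--     })
--
--     neighbours = frozenset(seq[idx] for idx in neighbour_indices)
--     return neighbours
-- ===== SOURCE B (Python) =====
-- def neighbour_set(seq, item):
--     """Slide over adjacent pairs (zip of seq with its own tail): a pair whose
--     right element is item contributes its left element, and vice versa.
--     No indices, no bound checks, no intermediate index collections."""
--     pairs = list(zip(seq, seq[1:]))
--     lefts = frozenset(a for a, b in pairs if b == item)
--     rights = frozenset(b for a, b in pairs if a == item)
--     return lefts | rights
-- ===== Notes on version B (the rewrite author's own statement) =====
-- stated objective: simpler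
-- what changed: Replaces A's index machinery (enumerate to an index list, two index-set comprehensions, union, then a value-lookup pass seq[idx]) by a sliding window over adjacent value pairs zip(seq, seq[1:]): neighbours are read directly off the pairs, so no indices, no bound checks and no lookups exist at all.
import Mathlib
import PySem

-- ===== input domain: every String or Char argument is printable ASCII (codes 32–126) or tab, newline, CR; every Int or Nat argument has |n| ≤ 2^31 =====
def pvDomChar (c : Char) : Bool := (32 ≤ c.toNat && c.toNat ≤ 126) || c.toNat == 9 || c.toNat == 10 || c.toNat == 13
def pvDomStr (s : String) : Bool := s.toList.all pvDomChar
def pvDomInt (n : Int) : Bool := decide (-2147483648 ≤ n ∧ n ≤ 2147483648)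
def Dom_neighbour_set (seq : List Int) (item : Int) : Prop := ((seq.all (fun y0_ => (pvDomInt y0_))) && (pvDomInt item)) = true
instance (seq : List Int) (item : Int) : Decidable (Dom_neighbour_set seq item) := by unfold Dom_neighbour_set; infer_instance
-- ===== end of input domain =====

-- B replaces A's index machinery (enumerate -> index list -> two index sets -> union -> seq[idx]
-- lookups) by a sliding window over adjacent value pairs zip(seq, seq[1:]) — a simpler, index-free decomposition.


-- ===== PORT A =====
-- indices here are always in [0, len seq), so List.pyGetD is exact for Python's seq[idx]
def neighbour_set (seq : List Int) (item : Int) : List Int :=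
  let indices : List Int :=
    (PySem.List.enumerate seq).foldl
      (fun acc p => if p.2 == item then acc ++ [p.1] else acc) []
  let s1 : PySem.Set Int :=
    PySem.Set.ofList (indices.foldl
      (fun acc x => if decide (x > 0) then acc ++ [x - 1] else acc) [])
  let s2 : PySem.Set Int :=
    PySem.Set.ofList (indices.foldl
      (fun acc x => if decide (x < (seq.length : Int) - 1) then acc ++ [x + 1] else acc) [])
  let neighbourIndices : PySem.Set Int := PySem.Set.union s1 s2
  PySem.Set.ofList (neighbourIndices.map (fun idx => PySem.List.pyGetD seq idx 0))

-- ===== PORT B =====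
def neighbour_set_alt (seq : List Int) (item : Int) : List Int :=
  let pairs : List (Int × Int) := seq.zip (PySem.List.slice seq (some 1) none)
  let lefts : PySem.Set Int :=
    PySem.Set.ofList (pairs.foldl (fun acc p => if p.2 == item then acc ++ [p.1] else acc) [])
  let rights : PySem.Set Int :=
    PySem.Set.ofList (pairs.foldl (fun acc p => if p.1 == item then acc ++ [p.2] else acc) [])
  PySem.Set.union lefts rights

-- ===== PRECONDITION & SPEC =====
def Spec_neighbour_set (seq : List Int) (item : Int) (out : List Int) : Prop := out = neighbour_set_alt seq item
instance (seq : List Int) (item : Int) (out : List Int) : Decidable (Spec_neighbour_set seq item out) := by unfold Spec_neighbour_set; infer_instance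

-- ===== CLAIM (what is proved, stated in full; the proofs are below) =====
def Claim_equal_neighbour_set : Prop := ∀ (seq : List Int) (item : Int), Dom_neighbour_set seq item → Spec_neighbour_set seq item (neighbour_set seq item)

-- ===== LEMMAS AND PROOFS =====

-- updating by a deduplicated list is updating by the list itself
theorem update_ofList_right {α : Type} [BEq α] [LawfulBEq α] (s : PySem.Set α) (t : List α) :
    PySem.Set.update s (PySem.Set.ofList t) = PySem.Set.update s t := by
  induction t using List.reverseRecOn with
  | nil => simp [PySem.Set.ofList]
  | append_singleton t0 x ih =>
    rw [PySem.Set.ofList_append_singleton, PySem.Set.update_append]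
    by_cases hx : x ∈ t0
    · rw [PySem.Set.add_of_mem ((PySem.Set.mem_ofList t0 x).mpr hx), ih]
      have hm : x ∈ PySem.Set.update s t0 := (PySem.Set.mem_update s t0 x).mpr (Or.inr hx)
      simp only [PySem.Set.update]
      exact (PySem.Set.add_of_mem hm).symm
    · rw [PySem.Set.add_of_not_mem (fun h => hx ((PySem.Set.mem_ofList t0 x).mp h)),
        PySem.Set.update_append, ih]

-- deduplicating before mapping does not change the resulting set
theorem ofList_map_ofList {α : Type} [BEq α] [LawfulBEq α] (f : α → α) (l : List α) :
    PySem.Set.ofList ((PySem.Set.ofList l).map f) = PySem.Set.ofList (l.map f) := by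
  induction l using List.reverseRecOn with
  | nil => simp [PySem.Set.ofList]
  | append_singleton t0 x ih =>
    rw [PySem.Set.ofList_append_singleton]
    by_cases hx : x ∈ t0
    · rw [PySem.Set.add_of_mem ((PySem.Set.mem_ofList t0 x).mpr hx), ih, List.map_append]
      simp only [List.map_singleton]
      rw [PySem.Set.ofList_append_singleton]
      have : f x ∈ PySem.Set.ofList (t0.map f) :=
        (PySem.Set.mem_ofList _ _).mpr (List.mem_map_of_mem hx)
      rw [PySem.Set.add_of_mem this]
    · rw [PySem.Set.add_of_not_mem (fun h => hx ((PySem.Set.mem_ofList t0 x).mp h)),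
        List.map_append, List.map_append]
      simp only [List.map_singleton]
      rw [PySem.Set.ofList_append_singleton, PySem.Set.ofList_append_singleton, ih]

-- A's left-neighbour values over a suffix t (preceded by pre ++ [prev]) are B's zip-pair lefts
theorem leftF (item : Int) : ∀ (t pre : List Int) (prev : Int),
    ((PySem.List.enumerate t ((pre.length : Int) + 1)).filter
        (fun p => decide (p.1 > 0) && (p.2 == item))).map
      (fun p => PySem.List.pyGetD (pre ++ prev :: t) (p.1 - 1) 0)
  = (((prev :: t).zip t).filter (fun p => p.2 == item)).map Prod.fst := by
  intro t
  induction t with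
  | nil => intro pre prev; simp [PySem.List.enumerate]
  | cons b t' ih =>
    intro pre prev
    rw [PySem.List.enumerate_cons, List.filter_cons]
    have h0 : decide (((pre.length : Int) + 1) > 0) = true := by simp
    have hcast : ((pre.length : Int) + 1 + 1) = (((pre ++ [prev]).length : Nat) : Int) + 1 := by
      simp
    have ih' := ih (pre ++ [prev]) b
    rw [List.append_assoc] at ih'
    simp only [List.singleton_append] at ih'
    rw [hcast]
    have hget : PySem.List.pyGetD (pre ++ prev :: b :: t') ((pre.length : Int) + 1 - 1) 0 = prev := by
      simp
    by_cases hb : (b == item) = true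
    · rw [if_pos (by simp [hb])]
      simp only [List.map_cons, ih', hget]
      simp [List.zip, hb]
    · rw [if_neg (by simp [hb])]
      rw [ih']
      simp [List.zip, hb]

-- A's right-neighbour values over a suffix rest (preceded by pre, total length N) are B's zip-pair rights
theorem rightF (item : Int) : ∀ (rest pre : List Int) (N : Int),
    (pre.length : Int) + rest.length = N →
    ((PySem.List.enumerate rest (pre.length : Int)).filter
        (fun p => decide (p.1 < N - 1) && (p.2 == item))).map
      (fun p => PySem.List.pyGetD (pre ++ rest) (p.1 + 1) 0)
  = ((rest.zip rest.tail).filter (fun p => p.1 == item)).map Prod.snd := by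
  intro rest
  induction rest with
  | nil => intro pre N h; simp [PySem.List.enumerate]
  | cons a rest' ih =>
    intro pre N h
    rw [PySem.List.enumerate_cons, List.filter_cons]
    match rest' with
    | [] =>
      have hc : decide (((pre.length : Int)) < N - 1) = false := by
        simp at h ⊢; omega
      rw [if_neg (by simp [hc])]
      simp [PySem.List.enumerate]
    | c :: t'' =>
      have hc : decide (((pre.length : Int)) < N - 1) = true := by
        simp at h ⊢; omega
      have hcast : ((pre.length : Int) + 1) = (((pre ++ [a]).length : Nat) : Int) := by simp
      have ih' := ih (pre ++ [a]) N (by simp at h ⊢; omega)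
      rw [List.append_assoc] at ih'
      simp only [List.singleton_append] at ih'
      have hget : PySem.List.pyGetD (pre ++ a :: c :: t'') ((pre.length : Int) + 1) 0 = c := by
        rw [show ((pre.length : Int) + 1) = (((pre.length + 1 : Nat)) : Int) by push_cast; ring]
        rw [PySem.List.pyGetD_natCast]
        rw [show pre ++ a :: c :: t'' = (pre ++ [a]) ++ c :: t'' by simp]
        rw [show pre.length + 1 = (pre ++ [a]).length by simp]
        simp [List.getD_eq_getElem?_getD]
      by_cases ha : (a == item) = true
      · rw [if_pos (by simp [hc, ha])]
        simp only [List.map_cons, hget]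
        rw [hcast, ih']
        simp [List.zip, ha]
      · rw [if_neg (by simp [hc, ha])]
        rw [hcast, ih']
        simp [List.zip, ha]

-- top-level forms of the two bridges (seq split at its head / pre = [])
theorem leftTop (seq : List Int) (item : Int) :
    ((PySem.List.enumerate seq).filter (fun a => decide (a.1 > 0) && a.2 == item)).map
      (fun x => PySem.List.pyGetD seq (x.1 - 1) 0)
  = ((seq.zip seq.tail).filter (fun x => x.2 == item)).map Prod.fst := by
  cases seq with
  | nil => simp [PySem.List.enumerate]
  | cons a t =>
    rw [show PySem.List.enumerate (a :: t) 0 = (0, a) :: PySem.List.enumerate t 1 from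
      PySem.List.enumerate_cons a t 0]
    rw [List.filter_cons, if_neg (by simp)]
    have h := leftF item t [] a
    simp only [List.length_nil, Nat.cast_zero, zero_add, List.nil_append] at h
    rw [h]
    simp

theorem rightTop (seq : List Int) (item : Int) :
    ((PySem.List.enumerate seq).filter
        (fun a => decide (a.1 < (seq.length : Int) - 1) && a.2 == item)).map
      (fun x => PySem.List.pyGetD seq (x.1 + 1) 0)
  = ((seq.zip seq.tail).filter (fun x => x.1 == item)).map Prod.snd := by
  have h := rightF item seq [] ((seq.length : Int)) (by simp)
  simp only [List.length_nil, Nat.cast_zero, List.nil_append] at h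
  exact h

-- ===== VERDICT (by name: the statement is the Claim_ definition above) =====
theorem neighbour_set_spec : Claim_equal_neighbour_set := by
  intro seq item _
  unfold Spec_neighbour_set neighbour_set neighbour_set_alt
  simp only [PySem.List.foldl_append_if, List.nil_append, PySem.Set.union,
    PySem.List.slice_from_one]
  rw [List.filter_map, List.filter_map, List.map_map, List.map_map]
  rw [update_ofList_right, ← PySem.Set.ofList_append, ofList_map_ofList, List.map_append,
    PySem.Set.ofList_append]
  rw [update_ofList_right]
  simp only [List.filter_filter, List.map_map, Function.comp_def]
  rw [leftTop, rightTop]
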